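-- pv_equiv track=rewrite | github.com/Arsen1302/Code-copy-detector | TestData/solutions/problem_1692_4.py | solution_1692_4
-- ===== SOURCE A (Python) =====
-- from typing import List
--
-- def solution_1692_4(nums: List[int]) -> int:
--
--     maxx = nums[0]
--     hole = 0
--     for i, x in enumerate(nums[1:], 1):
--         if x - maxx > hole:
--             extra_blocks = x - maxx - hole  # extra blocks after filling hole
--             cols = i + 1
--             if extra_blocks % cols == 0:
--                 maxx = maxx + extra_blocks // cols
--                 hole = 0
--             else:
--                 maxx = maxx + extra_blocks // cols + 1
--                 hole = cols - extra_blocks % cols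
--         else:
--             hole = hole + (maxx - x)
--
--     return maxx
-- ===== SOURCE B (Python) =====
-- from typing import List
--
-- def solution_1692_4(nums: List[int]) -> int:
--     # running prefix sum; answer is the max over prefixes of ceil(prefix_sum / length)
--     total = nums[0]
--     best = total
--     k = 1
--     for x in nums[1:]:
--         total += x
--         k += 1
--         best = max(best, -(-total // k))
--     return best
-- ===== Notes on version B (the rewrite author's own statement) =====
-- stated objective: simpler
-- what changed: Replaces A's incremental hole/maxx leveling simulation with a direct one-pass running maximum of the ceiling average ceil(prefix_sum/k) over all prefixes, computed with floor-division as -(-total//k).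
import Mathlib
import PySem

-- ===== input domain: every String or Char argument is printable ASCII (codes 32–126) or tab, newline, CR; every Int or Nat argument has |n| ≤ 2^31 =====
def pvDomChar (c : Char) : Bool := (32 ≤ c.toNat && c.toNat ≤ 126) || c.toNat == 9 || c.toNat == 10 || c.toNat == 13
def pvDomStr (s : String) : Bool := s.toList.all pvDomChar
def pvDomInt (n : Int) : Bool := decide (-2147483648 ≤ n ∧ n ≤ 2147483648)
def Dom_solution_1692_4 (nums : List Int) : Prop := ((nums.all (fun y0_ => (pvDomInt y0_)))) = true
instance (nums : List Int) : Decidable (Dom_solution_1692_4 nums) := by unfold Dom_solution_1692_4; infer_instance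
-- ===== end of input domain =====

-- B replaces A's hole/maxx leveling simulation by a one-pass running maximum of the
-- per-prefix ceiling average ceil(prefix_sum/k); same O(n) cost, simpler structure.


-- ===== PORT A =====
-- loop body of A: state (maxx, hole), element (i, x) from enumerate(nums[1:], 1)
def stepA_1692 (st : Int × Int) (p : Int × Int) : Int × Int :=
  let maxx := st.1
  let hole := st.2
  let i := p.1
  let x := p.2
  if hole < x - maxx then
    let extra := x - maxx - hole
    let cols := i + 1
    if PySem.Int.mod extra cols = 0 then
      (maxx + PySem.Int.floordiv extra cols, 0)
    else
      (maxx + PySem.Int.floordiv extra cols + 1, cols - PySem.Int.mod extra cols)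
  else
    (maxx, hole + (maxx - x))

def solution_1692_4 (nums : List Int) : Int :=
  -- nums[0]: none = IndexError on the empty list, excluded by Pre_
  let maxx0 := (PySem.List.pyGet? nums 0).getD 0
  ((PySem.List.enumerate (PySem.List.slice nums (some 1) none) 1).foldl
      stepA_1692 (maxx0, 0)).1

-- ===== PORT B =====
-- loop body of B: state (best, total, k), element x from nums[1:]
def stepB_1692 (st : Int × Int × Int) (x : Int) : Int × Int × Int :=
  let total := st.2.1 + x
  let k := st.2.2 + 1
  (max st.1 (-(PySem.Int.floordiv (-total) k)), total, k)

def solution_1692_4_alt (nums : List Int) : Int :=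
  -- nums[0]: none = IndexError on the empty list, excluded by Pre_
  let t0 := (PySem.List.pyGet? nums 0).getD 0
  ((PySem.List.slice nums (some 1) none).foldl stepB_1692 (t0, t0, 1)).1

-- ===== PRECONDITION & SPEC =====
-- Both A and B raise IndexError (nums[0]) on the empty list; Pre_ excludes exactly that input.
def Pre_solution_1692_4 (nums : List Int) : Prop := nums ≠ []
instance (nums : List Int) : Decidable (Pre_solution_1692_4 nums) := by unfold Pre_solution_1692_4; infer_instance
def pvWitness_solution_1692_4 : List Int := [2, 7, 1, 5]

def Spec_solution_1692_4 (nums : List Int) (out : Int) : Prop := out = solution_1692_4_alt nums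
instance (nums : List Int) (out : Int) : Decidable (Spec_solution_1692_4 nums out) := by unfold Spec_solution_1692_4; infer_instance

-- ===== CLAIM (what is proved, stated in full; the proofs are below) =====
def Claim_equal_solution_1692_4 : Prop := ∀ (nums : List Int), Dom_solution_1692_4 nums → Pre_solution_1692_4 nums → Spec_solution_1692_4 nums (solution_1692_4 nums)

-- ===== LEMMAS AND PROOFS =====

-- One step of A, started from a state satisfying the invariant
-- (hole = maxx * k - T0 for the prefix sum T0, 0 ≤ hole), produces the state
-- (max maxx (ceil T / (k+1)), its hole) for the new prefix sum T = T0 + x.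
theorem stepA_1692_eq (maxx hole k x : Int) (hk : 1 ≤ k) (hh : 0 ≤ hole) :
    stepA_1692 (maxx, hole) (k, x)
      = (max maxx (-(PySem.Int.floordiv (-(maxx * k - hole + x)) (k + 1))),
         max maxx (-(PySem.Int.floordiv (-(maxx * k - hole + x)) (k + 1))) * (k + 1)
           - (maxx * k - hole + x))
    ∧ 0 ≤ max maxx (-(PySem.Int.floordiv (-(maxx * k - hole + x)) (k + 1))) * (k + 1)
           - (maxx * k - hole + x) := by
  have hc : (0 : Int) < k + 1 := by omega
  set T : Int := maxx * k - hole + x with hT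
  set C : Int := -(PySem.Int.floordiv (-T) (k + 1)) with hCdef
  have hC : (C - 1) * (k + 1) < T ∧ T ≤ C * (k + 1) :=
    (PySem.Int.neg_floordiv_neg_eq_iff_of_pos hc).mp hCdef.symm
  have hring : maxx * (k + 1) = maxx * k + maxx := by ring
  by_cases hbr : hole < x - maxx
  · -- A fills the hole and distributes the extra blocks
    have hex : maxx * (k + 1) < T := by omega
    have hmaxC : maxx < C :=
      lt_of_mul_lt_mul_right (by omega : maxx * (k + 1) < C * (k + 1)) hc.le
    have hm' : max maxx C = C := max_eq_right hmaxC.le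
    rw [hm']
    unfold stepA_1692
    simp only [hbr, if_true]
    set extra : Int := x - maxx - hole with hextra
    have hdm := PySem.Int.floordiv_mul_add_mod extra (k + 1)
    by_cases hmod : PySem.Int.mod extra (k + 1) = 0
    · simp only [hmod, if_true]
      set q : Int := maxx + PySem.Int.floordiv extra (k + 1) with hq
      have hqe : q * (k + 1) = maxx * (k + 1) + PySem.Int.floordiv extra (k + 1) * (k + 1) := by
        ring
      have hqc : q * (k + 1) = T := by omega
      have hqC : C = q := by
        rw [hCdef]
        refine (PySem.Int.neg_floordiv_neg_eq_iff_of_pos hc).mpr ⟨?_, by omega⟩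
        have : (q - 1) * (k + 1) = q * (k + 1) - (k + 1) := by ring
        omega
      rw [hqC]
      exact ⟨by rw [Prod.mk.injEq]; exact ⟨rfl, by omega⟩, by omega⟩
    · simp only [hmod, if_false]
      have hmE : PySem.Int.mod extra (k + 1) = extra % (k + 1) :=
        PySem.Int.mod_eq_emod_of_pos hc
      have hm0 : 0 ≤ PySem.Int.mod extra (k + 1) := by
        rw [hmE]; exact Int.emod_nonneg _ (by omega)
      have hm1 : PySem.Int.mod extra (k + 1) < k + 1 := by
        rw [hmE]; exact Int.emod_lt_of_pos _ hc
      set q : Int := maxx + PySem.Int.floordiv extra (k + 1) + 1 with hq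
      have hqe : q * (k + 1)
          = maxx * (k + 1) + PySem.Int.floordiv extra (k + 1) * (k + 1) + (k + 1) := by
        ring
      have hqc : q * (k + 1) = T + ((k + 1) - PySem.Int.mod extra (k + 1)) := by omega
      have hqC : C = q := by
        rw [hCdef]
        refine (PySem.Int.neg_floordiv_neg_eq_iff_of_pos hc).mpr ⟨?_, by omega⟩
        have : (q - 1) * (k + 1) = q * (k + 1) - (k + 1) := by ring
        omega
      rw [hqC]
      exact ⟨by rw [Prod.mk.injEq]; exact ⟨rfl, by omega⟩, by omega⟩
  · -- no new blocks needed: hole grows, maxx (and the running ceiling max) unchanged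
    have hle : T ≤ maxx * (k + 1) := by omega
    have hCle : C ≤ maxx := by
      have h1 : (C - 1) * (k + 1) < maxx * (k + 1) := by omega
      have := lt_of_mul_lt_mul_right h1 hc.le
      omega
    have hm' : max maxx C = maxx := max_eq_left hCle
    rw [hm']
    unfold stepA_1692
    simp only [hbr, if_false]
    exact ⟨by rw [Prod.mk.injEq]; exact ⟨rfl, by omega⟩, by omega⟩

-- Main loop correspondence: A's fold over enumerate(l, k) from (maxx, hole) returns the
-- same first component as B's fold over l from (maxx, maxx*k - hole, k).
theorem fold_1692_eq (l : List Int) (maxx hole k : Int) (hk : 1 ≤ k) (hh : 0 ≤ hole) :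
    ((PySem.List.enumerate l k).foldl stepA_1692 (maxx, hole)).1
      = (l.foldl stepB_1692 (maxx, maxx * k - hole, k)).1 := by
  induction l generalizing maxx hole k with
  | nil => simp [PySem.List.enumerate_nil]
  | cons x l ih =>
    rw [PySem.List.enumerate_cons]
    simp only [List.foldl_cons]
    obtain ⟨hstep, hpos⟩ := stepA_1692_eq maxx hole k x hk hh
    rw [hstep]
    have hB : stepB_1692 (maxx, maxx * k - hole, k) x
        = (max maxx (-(PySem.Int.floordiv (-(maxx * k - hole + x)) (k + 1))),
           maxx * k - hole + x, k + 1) := by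
      simp [stepB_1692]
    rw [hB]
    set m' : Int := max maxx (-(PySem.Int.floordiv (-(maxx * k - hole + x)) (k + 1)))
    have := ih m' (m' * (k + 1) - (maxx * k - hole + x)) (k + 1) (by omega) hpos
    rw [this]
    ring_nf

-- ===== VERDICT (by name: the statement is the Claim_ definition above) =====
theorem solution_1692_4_spec : Claim_equal_solution_1692_4 := by
  intro nums _ hpre
  unfold Spec_solution_1692_4 solution_1692_4 solution_1692_4_alt
  cases nums with
  | nil => exact absurd rfl hpre
  | cons a l =>
    simp only [PySem.List.slice_from_one, List.tail_cons]
    have h0 : (PySem.List.pyGet? (a :: l) 0).getD 0 = a := by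
      simp [PySem.List.pyGet?, PySem.List.pyIdx?]
    rw [h0]
    have := fold_1692_eq l a 0 1 (by omega) (by omega)
    simpa using this
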